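-- pv_equiv track=rewrite | github.com/codingame-team/DND5e-Test | src/utils/pdf_reader.py | _generate_simple_ascii_map
-- ===== SOURCE A (Python) =====
-- from typing import List, Dict, Optional, Tuple
--
-- def _generate_simple_ascii_map(locations: List[str]) -> str:
--     """Générer une map ASCII simple avec les lieux"""
--     width = 40
--     height = 15
--
--     # Créer grille vide
--     grid = [['.' for _ in range(width)] for _ in range(height)]
--
--     # Bordures
--     for x in range(width):
--         grid[0][x] = '#'
--         grid[height-1][x] = '#'
--     for y in range(height):
--         grid[y][0] = '#'
--         grid[y][width-1] = '#'
--
--     # Placer lieux (positions fixes valides)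
--     # Format: (row/y, col/x) dans les limites de la grille
--     positions = [
--         (3, 5),   # A - en haut à gauche
--         (3, 20),  # B - en haut à droite
--         (7, 12),  # C - au centre
--         (11, 8),  # D - en bas à gauche
--         (11, 25)  # E - en bas à droite
--     ]
--
--     for i, loc in enumerate(locations[:5]):
--         if i < len(positions):
--             row, col = positions[i]
--             # Vérifier que les positions sont valides
--             if 0 <= row < height and 0 <= col < width:
--                 letter = chr(65 + i)  # A, B, C, D, E
--                 grid[row][col] = letter
--
--     # Convertir en string
--     map_str = "\n".join("".join(row) for row in grid)
--
--     # Ajouter légende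
--     legend = "\n\nLégende:\n"
--     for i, loc in enumerate(locations[:5]):
--         legend += f"  {chr(65+i)} = {loc}\n"
--
--     return map_str + legend
-- ===== SOURCE B (Python) =====
-- def _generate_simple_ascii_map(locations):
--     """Générer une map ASCII simple avec les lieux"""
--     width = 40
--     height = 15
--     positions = [(3, 5), (3, 20), (7, 12), (11, 8), (11, 25)]
--     # sparse position -> letter table; no mutable grid
--     pos_map = {positions[i]: chr(65 + i) for i in range(min(len(locations), 5))}
--     map_str = "\n".join(
--         "".join(
--             '#' if x in (0, width - 1) or y in (0, height - 1)
--             else pos_map.get((y, x), '.')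
--             for x in range(width)
--         )
--         for y in range(height)
--     )
--     legend = "\n\nLégende:\n" + "".join(
--         f"  {chr(65 + i)} = {loc}\n" for i, loc in enumerate(locations[:5])
--     )
--     return map_str + legend
-- ===== Notes on version B (the rewrite author's own statement) =====
-- stated objective: simpler
-- what changed: B replaces A's mutable 15x40 grid (allocated, bordered and overwritten by four separate loops) with a sparse position-to-letter dict and renders every cell directly from border/table rules in a single comprehension pass.
import Mathlib
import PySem

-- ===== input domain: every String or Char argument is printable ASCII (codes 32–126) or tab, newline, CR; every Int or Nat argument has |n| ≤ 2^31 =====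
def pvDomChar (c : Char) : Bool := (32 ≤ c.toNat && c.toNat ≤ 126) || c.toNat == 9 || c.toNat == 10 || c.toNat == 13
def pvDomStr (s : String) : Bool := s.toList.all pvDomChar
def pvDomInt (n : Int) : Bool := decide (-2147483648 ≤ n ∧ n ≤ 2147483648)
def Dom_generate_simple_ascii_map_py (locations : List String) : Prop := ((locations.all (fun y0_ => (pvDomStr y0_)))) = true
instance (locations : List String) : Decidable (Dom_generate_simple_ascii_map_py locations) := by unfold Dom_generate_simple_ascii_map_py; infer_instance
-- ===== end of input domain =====

-- B replaces A's mutable 15×40 grid (built, bordered and overwritten in four loops)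
-- by a sparse position→letter table and computes every cell from border/table rules
-- in one rendering pass; objective: simpler, no speed claim.

-- ===== PORT A =====
-- the fixed letter positions (row, col)
def pvPositions : List (Int × Int) := [(3, 5), (3, 20), (7, 12), (11, 8), (11, 25)]

-- grid[r][c] = ch  (r, c always in range in A; plain list update)
def pvSetCell (g : List (List Char)) (r c : Nat) (ch : Char) : List (List Char) :=
  g.set r ((g.getD r []).set c ch)

-- body of A's placement loop: for i, loc in enumerate(locations[:5]) (loc unused for the grid)
def pvPlace (g : List (List Char)) (p : Int × String) : List (List Char) :=
  if p.1 < (pvPositions.length : Int) then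
    let rc := PySem.List.pyGetD pvPositions p.1 (0, 0)
    if 0 ≤ rc.1 ∧ rc.1 < 15 ∧ 0 ≤ rc.2 ∧ rc.2 < 40 then
      pvSetCell g rc.1.toNat rc.2.toNat (Char.ofNat (65 + p.1).toNat)
    else g
  else g

-- A's grid pipeline + "\n".join("".join(row) …), as a function of enumerate(locations[:5])
def pvAMap (enum5 : List (Int × String)) : String :=
  let grid0 := (PySem.List.pyRange 0 15 1).map
      (fun _ => (PySem.List.pyRange 0 40 1).map (fun _ => '.'))
  let grid1 := (PySem.List.pyRange 0 40 1).foldl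
      (fun g x => pvSetCell (pvSetCell g 0 x.toNat '#') (15 - 1) x.toNat '#') grid0
  let grid2 := (PySem.List.pyRange 0 15 1).foldl
      (fun g y => pvSetCell (pvSetCell g y.toNat 0 '#') y.toNat (40 - 1) '#') grid1
  let grid3 := enum5.foldl pvPlace grid2
  PySem.Str.join "\n" (grid3.map (fun row => String.ofList row))

-- one legend line f"  {chr(65+i)} = {loc}\n"
def pvLegendItem (p : Int × String) : String :=
  "  " ++ String.ofList [Char.ofNat (65 + p.1).toNat] ++ " = " ++ p.2 ++ "\n"

-- A's legend accumulation loop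
def pvALegend (enum5 : List (Int × String)) : String :=
  enum5.foldl (fun acc p => acc ++ pvLegendItem p) "\n\nLégende:\n"

def generate_simple_ascii_map_py (locations : List String) : String :=
  let enum5 := PySem.List.enumerate (PySem.List.slice locations none (some 5)) 0
  pvAMap enum5 ++ pvALegend enum5

-- ===== PORT B =====
-- B's sparse table {positions[i]: chr(65+i) for i in range(min(len(locations),5))}
def pvPosMap (n : Nat) : PySem.Dict (Int × Int) Char :=
  (List.range (min n 5)).foldl
    (fun d i => d.insert (pvPositions.getD i (0, 0)) (Char.ofNat (65 + i))) PySem.Dict.empty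

-- B's single rendering pass over y, x
def pvBMap (n : Nat) : String :=
  let pos_map := pvPosMap n
  PySem.Str.join "\n" ((List.range 15).map (fun y =>
    String.ofList ((List.range 40).map (fun x =>
      if x = 0 ∨ x = 40 - 1 ∨ y = 0 ∨ y = 15 - 1 then '#'
      else pos_map.getD ((y : Int), (x : Int)) '.'))))

-- B's legend: "".join of one string per enumerated location
def pvBLegend (enum5 : List (Int × String)) : String :=
  "\n\nLégende:\n" ++ PySem.Str.join "" (enum5.map pvLegendItem)

def generate_simple_ascii_map_py_alt (locations : List String) : String :=
  pvBMap locations.length ++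
    pvBLegend (PySem.List.enumerate (PySem.List.slice locations none (some 5)) 0)

-- ===== PRECONDITION & SPEC =====
def Spec_generate_simple_ascii_map_py (locations : List String) (out : String) : Prop := out = generate_simple_ascii_map_py_alt locations
instance (locations : List String) (out : String) : Decidable (Spec_generate_simple_ascii_map_py locations out) := by unfold Spec_generate_simple_ascii_map_py; infer_instance

-- ===== CLAIM (what is proved, stated in full; the proofs are below) =====
def Claim_equal_generate_simple_ascii_map_py : Prop := ∀ (locations : List String), Dom_generate_simple_ascii_map_py locations → Spec_generate_simple_ascii_map_py locations (generate_simple_ascii_map_py locations)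

-- ===== LEMMAS AND PROOFS =====

-- "".join over a cons: x ++ the join of the rest
theorem pv_join0_cons (x : String) (l : List String) :
    PySem.Str.join "" (x :: l) = x ++ PySem.Str.join "" l := by
  apply String.toList_inj.mp
  cases l with
  | nil => simp [PySem.Str.toList_join, PySem.Chars.join_singleton, PySem.Chars.join_nil]
  | cons y ys => simp [PySem.Str.toList_join, PySem.Chars.join_cons_cons]

-- A's accumulate-by-append loop equals init ++ "".join(map f ...)
theorem pv_foldl_join (f : Int × String → String) :
    ∀ (xs : List (Int × String)) (s : String),
      xs.foldl (fun acc p => acc ++ f p) s = s ++ PySem.Str.join "" (xs.map f) := by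
  intro xs
  induction xs with
  | nil => intro s; simp [PySem.Str.join, PySem.Chars.join_nil]
  | cons x t ih =>
    intro s
    simp only [List.foldl_cons, List.map_cons, pv_join0_cons, ih, String.append_assoc]

theorem pv_legend_eq (enum5 : List (Int × String)) : pvALegend enum5 = pvBLegend enum5 := by
  unfold pvALegend pvBLegend
  exact pv_foldl_join pvLegendItem enum5 _

-- B's map string only depends on min n 5
theorem pvBMap_congr {n m : Nat} (h : min n 5 = min m 5) : pvBMap n = pvBMap m := by
  unfold pvBMap pvPosMap
  rw [h]

set_option maxHeartbeats 2000000 in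
-- the rendered 15×40 map: A's mutated grid equals B's rule-computed one
theorem pv_map_eq (locations : List String) :
    pvAMap (PySem.List.enumerate (PySem.List.slice locations none (some 5)) 0)
      = pvBMap locations.length := by
  match locations with
  | [] => rfl
  | [a] => rfl
  | [a, b] => rfl
  | [a, b, c] => rfl
  | [a, b, c, d] => rfl
  | a :: b :: c :: d :: e :: t =>
    rw [show (5 : Int) = ((5 : Nat) : Int) from rfl, PySem.List.slice_to_natCast,
        pvBMap_congr (show min (a :: b :: c :: d :: e :: t).length 5 = min 5 5 by simp)]
    rfl

theorem pv_main (locations : List String) :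
    generate_simple_ascii_map_py locations = generate_simple_ascii_map_py_alt locations := by
  simp only [generate_simple_ascii_map_py, generate_simple_ascii_map_py_alt]
  rw [pv_legend_eq, pv_map_eq]

-- ===== VERDICT (by name: the statement is the Claim_ definition above) =====
theorem generate_simple_ascii_map_py_spec : Claim_equal_generate_simple_ascii_map_py := by
  intro l _
  unfold Spec_generate_simple_ascii_map_py
  exact pv_main l
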